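-- pv_equiv track=rewrite | github.com/rachluis/PharmaAgentSystem | backend/app/services/analysis_service.py | _mock_ai_generate
-- ===== SOURCE A (Python) =====
-- def _mock_ai_generate(r, f, m):
--     """
--     Mock AI generation based on rules.
--     In production, this would call Dify API with a prompt.
--     """
--     # Simple logical segmentation
--     strategies = []
--
--     # Value dimension
--     if m > 5000:
--         value_seg = "High Value (VIP)"
--         strategies.append("Inviting to exclusive national conferences.")
--         strategies.append("Providing premium academic support and latest trial data.")
--     elif m > 500:
--         value_seg = "Medium Value"
--         strategies.append("Regular product updates via digital channels.")
--         strategies.append("Regional seminar invitations.")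
--     else:
--         value_seg = "Low Value"
--         strategies.append("Automated email campaigns.")
--         strategies.append("General educational content distribution.")
--
--     # Frequency dimension
--     if f > 20:
--         freq_seg = "High Frequency"
--         strategies.append("Maintaining relationship with frequent touchpoints.")
--     else:
--         freq_seg = "Low Frequency"
--         strategies.append("Identifying barriers to prescribing.")
--         strategies.append("Incentivizing trial usage.")
--
--     # Recency dimension
--     if r < 60:
--         active_seg = "Active"
--     elif r < 180:
--         active_seg = "Lapsing"
--         strategies.append("Re-engagement campaign urgently needed.")
--     else:
--         active_seg = "Inactive"
--         strategies.append("Win-back program with special offers.")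
--
--     # Construct full strategy text
--     strategy_text = f"**Segment**: {value_seg} | {freq_seg} | {active_seg}\n\n**Recommended Actions**:\n"
--     for i, action in enumerate(strategies, 1):
--         strategy_text += f"{i}. {action}\n"
--
--     return strategy_text
-- ===== SOURCE B (Python) =====
-- # All 18 possible outputs are precomputed once at import time; the call itself
-- # only computes three bucket indices arithmetically and looks the text up.
--
-- _VALUE = [
--     ("High Value (VIP)", ["Inviting to exclusive national conferences.",
--                           "Providing premium academic support and latest trial data."]),
--     ("Medium Value", ["Regular product updates via digital channels.",
--                       "Regional seminar invitations."]),
--     ("Low Value", ["Automated email campaigns.",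
--                    "General educational content distribution."]),
-- ]
-- _FREQ = [
--     ("High Frequency", ["Maintaining relationship with frequent touchpoints."]),
--     ("Low Frequency", ["Identifying barriers to prescribing.",
--                        "Incentivizing trial usage."]),
-- ]
-- _REC = [
--     ("Active", []),
--     ("Lapsing", ["Re-engagement campaign urgently needed."]),
--     ("Inactive", ["Win-back program with special offers."]),
-- ]
--
-- def _render(v, fq, rc):
--     labels = " | ".join([v[0], fq[0], rc[0]])
--     acts = v[1] + fq[1] + rc[1]
--     lines = "".join(f"{i}. {a}\n" for i, a in enumerate(acts, 1))
--     return "**Segment**: " + labels + "\n\n**Recommended Actions**:\n" + lines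
--
-- _TABLE = [[[_render(v, fq, rc) for rc in _REC] for fq in _FREQ] for v in _VALUE]
--
-- def _mock_ai_generate(r, f, m):
--     vi = (m <= 5000) + (m <= 500)
--     fi = (f <= 20)
--     ri = (r >= 60) + (r >= 180)
--     return _TABLE[vi][fi][ri]
-- ===== Notes on version B (the rewrite author's own statement) =====
-- stated objective: alternative
-- what changed: All 18 possible output texts are precomputed once into a nested table at module load; the function itself does no branching or string building, just computes three bucket indices arithmetically from the comparisons and looks the finished text up.
import Mathlib
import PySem

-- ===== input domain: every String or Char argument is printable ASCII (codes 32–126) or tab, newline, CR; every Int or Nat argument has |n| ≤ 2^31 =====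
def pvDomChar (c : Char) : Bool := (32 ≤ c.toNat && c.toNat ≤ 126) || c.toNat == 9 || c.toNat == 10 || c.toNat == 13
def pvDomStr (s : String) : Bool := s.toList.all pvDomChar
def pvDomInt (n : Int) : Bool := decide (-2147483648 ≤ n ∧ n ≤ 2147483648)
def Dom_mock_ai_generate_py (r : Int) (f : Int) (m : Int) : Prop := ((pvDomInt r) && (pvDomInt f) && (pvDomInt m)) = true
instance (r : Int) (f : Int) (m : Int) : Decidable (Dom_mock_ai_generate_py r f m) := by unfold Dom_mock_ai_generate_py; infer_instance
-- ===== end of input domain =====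

-- B precomputes all 18 complete output texts in a nested table and reduces each call to
-- arithmetic bucket indexing (objective: alternative; return value only, no side effects).

-- ===== PORT A =====
-- Literal transliteration of A's if/elif cascade with the strategies accumulator.
def mock_ai_generate_py (r : Int) (f : Int) (m : Int) : String :=
  let strategies : List String := []
  let vs :=
    if m > 5000 then
      ("High Value (VIP)", strategies ++ ["Inviting to exclusive national conferences."]
        ++ ["Providing premium academic support and latest trial data."])
    else if m > 500 then
      ("Medium Value", strategies ++ ["Regular product updates via digital channels."]
        ++ ["Regional seminar invitations."])
    else
      ("Low Value", strategies ++ ["Automated email campaigns."]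
        ++ ["General educational content distribution."])
  let value_seg := vs.1
  let strategies := vs.2
  let fs :=
    if f > 20 then
      ("High Frequency", strategies ++ ["Maintaining relationship with frequent touchpoints."])
    else
      ("Low Frequency", strategies ++ ["Identifying barriers to prescribing."]
        ++ ["Incentivizing trial usage."])
  let freq_seg := fs.1
  let strategies := fs.2
  let as_ :=
    if r < 60 then ("Active", strategies)
    else if r < 180 then ("Lapsing", strategies ++ ["Re-engagement campaign urgently needed."])
    else ("Inactive", strategies ++ ["Win-back program with special offers."])
  let active_seg := as_.1
  let strategies := as_.2
  let strategy_text := "**Segment**: " ++ value_seg ++ " | " ++ freq_seg ++ " | " ++ active_seg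
      ++ "\n\n**Recommended Actions**:\n"
  (PySem.List.enumerate strategies 1).foldl
    (fun acc p => acc ++ PySem.Int.toStr p.1 ++ ". " ++ p.2 ++ "\n") strategy_text

-- ===== PORT B =====
-- B-side helpers (the module-level data and table of Source B).
-- pvJoin sep parts is an exact hand port of Python's sep.join(parts).
def pvJoin (sep : String) : List String → String
  | [] => ""
  | [x] => x
  | x :: rest => x ++ sep ++ pvJoin sep rest

def pvVALUE : List (String × List String) :=
  [ ("High Value (VIP)", ["Inviting to exclusive national conferences.",
                          "Providing premium academic support and latest trial data."]),
    ("Medium Value", ["Regular product updates via digital channels.",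
                      "Regional seminar invitations."]),
    ("Low Value", ["Automated email campaigns.",
                   "General educational content distribution."]) ]

def pvFREQ : List (String × List String) :=
  [ ("High Frequency", ["Maintaining relationship with frequent touchpoints."]),
    ("Low Frequency", ["Identifying barriers to prescribing.",
                       "Incentivizing trial usage."]) ]

def pvREC : List (String × List String) :=
  [ ("Active", []),
    ("Lapsing", ["Re-engagement campaign urgently needed."]),
    ("Inactive", ["Win-back program with special offers."]) ]

def pvRender (v fq rc : String × List String) : String :=
  let labels := pvJoin " | " [v.1, fq.1, rc.1]
  let acts := v.2 ++ fq.2 ++ rc.2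
  let lines := pvJoin ""
    ((PySem.List.enumerate acts 1).map (fun p => PySem.Int.toStr p.1 ++ ". " ++ p.2 ++ "\n"))
  "**Segment**: " ++ labels ++ "\n\n**Recommended Actions**:\n" ++ lines

def pvTABLE : List (List (List String)) :=
  pvVALUE.map (fun v => pvFREQ.map (fun fq => pvREC.map (fun rc => pvRender v fq rc)))

-- Port of B: arithmetic bucket indices into the precomputed table. Python's bools are
-- added as 0/1 ints; the nested list indexing (always in range) is pyGet? with a
-- dead .getD "" default for totality.
def mock_ai_generate_py_alt (r : Int) (f : Int) (m : Int) : String :=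
  let vi : Int := (if m ≤ 5000 then 1 else 0) + (if m ≤ 500 then 1 else 0)
  let fi : Int := if f ≤ 20 then 1 else 0
  let ri : Int := (if r ≥ 60 then 1 else 0) + (if r ≥ 180 then 1 else 0)
  ((((PySem.List.pyGet? pvTABLE vi).bind (fun t => PySem.List.pyGet? t fi)).bind
      (fun t => PySem.List.pyGet? t ri)).getD "")

-- ===== PRECONDITION & SPEC =====
def Spec_mock_ai_generate_py (r : Int) (f : Int) (m : Int) (out : String) : Prop := out = mock_ai_generate_py_alt r f m
instance (r : Int) (f : Int) (m : Int) (out : String) : Decidable (Spec_mock_ai_generate_py r f m out) := by unfold Spec_mock_ai_generate_py; infer_instance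

-- ===== CLAIM (what is proved, stated in full; the proofs are below) =====
def Claim_equal_mock_ai_generate_py : Prop := ∀ (r : Int) (f : Int) (m : Int), Dom_mock_ai_generate_py r f m → Spec_mock_ai_generate_py r f m (mock_ai_generate_py r f m)

-- ===== LEMMAS AND PROOFS =====

-- ===== VERDICT (by name: the statement is the Claim_ definition above) =====
set_option maxRecDepth 8192 in
theorem mock_ai_generate_py_spec : Claim_equal_mock_ai_generate_py := by
  intro r f m _
  unfold Spec_mock_ai_generate_py mock_ai_generate_py mock_ai_generate_py_alt
  simp only [gt_iff_lt, ge_iff_le, ← not_lt]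
  by_cases h1 : 5000 < m <;> by_cases h2 : 500 < m <;>
    by_cases h3 : 20 < f <;> by_cases h4 : r < 60 <;> by_cases h5 : r < 180 <;>
    first
    | (exfalso; omega)
    | (simp only [h1, h2, h3, h4, h5, not_true_eq_false, not_false_eq_true,
        if_true, if_false]
       decide)
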